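-- pv_equiv track=rewrite | github.com/AA-237/python-algorithms | salary_alth.py | calculate_salary
-- ===== SOURCE A (Python) =====
-- def calculate_salary(bookings, shifts):
--     #  Getting  all the bookings done by the agent and seperating between residence and commercial
--     residence_bookings = [booking for booking in bookings if booking['type'] == 'residence']
--     commercial_bookings = [booking for booking in bookings if booking['type'] == 'commercial']
--
--     #this bonus format is derived from the problem statement provided
--     total_residence_bonus = calculate_bonus(residence_bookings, 20, 10, 5, 50)
--     total_commercial_bonus = calculate_bonus(commercial_bookings, 5, 3, 1, 100)
--
--     total_shifts = len(shifts)
--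
--     # Total_Salary = Total shift done by agent * 500 + (Total_Bonus)
--     total_salary = total_shifts * 500 + total_residence_bonus + total_commercial_bonus
--
--     return total_salary
--
-- def calculate_bonus(bookings, bonus1, bonus2, bonus3, base):
--     length = len(bookings)
--     result1 = length // bonus1
--     remainder1 = length % bonus1
--     if remainder1 > 0:
--         result2 = remainder1 // bonus2
--         remainder2 = remainder1 % bonus2
--         if remainder2 > 0:
--             result3 = remainder2 // bonus3
--             remainder3 = remainder2 % bonus3
--         else:
--             result3 = remainder3 = 0
--     else:
--         result2 = result3 = remainder3 = 0
--
--     total_bonus = bonus1 * result1 + bonus2 * result2 + bonus3 * result3 + remainder3 * base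
--     return total_bonus
-- ===== SOURCE B (Python) =====
-- def calculate_salary(bookings, shifts):
--     # single pass over bookings; the nested bonus ladder collapses to closed forms:
--     # residence bonus = n + (n%5)*49, commercial bonus = n
--     nr = nc = 0
--     for b in bookings:
--         t = b['type']
--         if t == 'residence':
--             nr += 1
--         elif t == 'commercial':
--             nc += 1
--     return 500 * len(shifts) + nr + (nr % 5) * 49 + nc
-- ===== Notes on version B (the rewrite author's own statement) =====
-- stated objective: simpler
-- what changed: B replaces the two filtering comprehensions and the nested floor-division/remainder bonus ladder by one counting pass and closed forms: the residence bonus telescopes to n + (n%5)*49 and the commercial bonus (steps 5,3,1) telescopes to exactly n.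
import Mathlib
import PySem

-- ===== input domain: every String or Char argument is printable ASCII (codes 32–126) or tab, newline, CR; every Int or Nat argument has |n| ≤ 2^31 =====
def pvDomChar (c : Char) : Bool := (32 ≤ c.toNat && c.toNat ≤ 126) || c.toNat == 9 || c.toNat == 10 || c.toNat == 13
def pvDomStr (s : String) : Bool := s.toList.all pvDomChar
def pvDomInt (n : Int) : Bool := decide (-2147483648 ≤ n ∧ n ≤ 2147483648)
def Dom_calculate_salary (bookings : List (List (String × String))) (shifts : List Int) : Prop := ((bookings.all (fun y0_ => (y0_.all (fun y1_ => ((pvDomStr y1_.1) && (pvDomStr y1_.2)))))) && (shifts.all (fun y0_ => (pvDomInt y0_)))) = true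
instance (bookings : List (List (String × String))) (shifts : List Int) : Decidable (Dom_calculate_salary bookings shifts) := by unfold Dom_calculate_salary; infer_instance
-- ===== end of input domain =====

-- ===== PORT A =====
-- literal port of calculate_bonus: nested floordiv/mod ladder, branches as in the Python
def calculate_bonus (bookings : List (List (String × String))) (bonus1 bonus2 bonus3 base : Int) : Int :=
  let length : Int := bookings.length
  let result1 := PySem.Int.floordiv length bonus1
  let remainder1 := PySem.Int.mod length bonus1
  let rrr : Int × Int × Int :=
    if remainder1 > 0 then
      let result2 := PySem.Int.floordiv remainder1 bonus2
      let remainder2 := PySem.Int.mod remainder1 bonus2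
      if remainder2 > 0 then
        (result2, PySem.Int.floordiv remainder2 bonus3, PySem.Int.mod remainder2 bonus3)
      else
        (result2, 0, 0)
    else
      (0, 0, 0)
  bonus1 * result1 + bonus2 * rrr.1 + bonus3 * rrr.2.1 + rrr.2.2 * base

-- booking['type'] == '...' ; a missing 'type' key raises KeyError in Python and is excluded by Pre_
def calculate_salary (bookings : List (List (String × String))) (shifts : List Int) : Int :=
  let residence_bookings := bookings.filter (fun b => b.lookup "type" == some "residence")
  let commercial_bookings := bookings.filter (fun b => b.lookup "type" == some "commercial")
  let total_residence_bonus := calculate_bonus residence_bookings 20 10 5 50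
  let total_commercial_bonus := calculate_bonus commercial_bookings 5 3 1 100
  let total_shifts : Int := shifts.length
  total_shifts * 500 + total_residence_bonus + total_commercial_bonus

-- ===== PORT B =====
-- one counting pass (nr, nc), then the closed-form bonuses
def calculate_salary_alt (bookings : List (List (String × String))) (shifts : List Int) : Int :=
  let counts := bookings.foldl
    (fun (acc : Int × Int) b =>
      match b.lookup "type" with
      | some t => if t == "residence" then (acc.1 + 1, acc.2)
                  else if t == "commercial" then (acc.1, acc.2 + 1) else acc
      | none => acc)
    (0, 0)
  500 * (shifts.length : Int) + counts.1 + PySem.Int.mod counts.1 5 * 49 + counts.2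

-- ===== PRECONDITION & SPEC =====
-- Pre_ excludes bookings lacking a 'type' key, on which Python A raises KeyError
def Pre_calculate_salary (bookings : List (List (String × String))) (shifts : List Int) : Prop :=
  bookings.all (fun b => (b.lookup "type").isSome) = true
instance (bookings : List (List (String × String))) (shifts : List Int) : Decidable (Pre_calculate_salary bookings shifts) := by unfold Pre_calculate_salary; infer_instance
def pvWitness_calculate_salary : (List (List (String × String))) × List Int :=
  ([[("type", "residence")], [("type", "commercial")], [("type", "other")]], [1, 2])

def Spec_calculate_salary (bookings : List (List (String × String))) (shifts : List Int) (out : Int) : Prop := out = calculate_salary_alt bookings shifts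
instance (bookings : List (List (String × String))) (shifts : List Int) (out : Int) : Decidable (Spec_calculate_salary bookings shifts out) := by unfold Spec_calculate_salary; infer_instance

-- ===== CLAIM (what is proved, stated in full; the proofs are below) =====
def Claim_equal_calculate_salary : Prop := ∀ (bookings : List (List (String × String))) (shifts : List Int), Dom_calculate_salary bookings shifts → Pre_calculate_salary bookings shifts → Spec_calculate_salary bookings shifts (calculate_salary bookings shifts)

-- ===== LEMMAS AND PROOFS =====

-- the residence ladder (20,10,5, base 50) telescopes to n + (n % 5) * 49
theorem bonus_residence (l : List (List (String × String))) :
    calculate_bonus l 20 10 5 50 = (l.length : Int) + PySem.Int.mod (l.length : Int) 5 * 49 := by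
  simp only [calculate_bonus,
    PySem.Int.floordiv_eq_ediv_of_pos (a := (l.length : Int)) (by norm_num : (0:Int) < 20),
    PySem.Int.mod_eq_emod_of_pos (a := (l.length : Int)) (by norm_num : (0:Int) < 20),
    PySem.Int.mod_eq_emod_of_pos (b := (5:Int)) (by norm_num : (0:Int) < 5)]
  by_cases h1 : (l.length : Int) % 20 > 0 <;>
    simp only [h1, if_true, if_false,
      PySem.Int.floordiv_eq_ediv_of_pos (by norm_num : (0:Int) < 10),
      PySem.Int.mod_eq_emod_of_pos (by norm_num : (0:Int) < 10),
      PySem.Int.floordiv_eq_ediv_of_pos (by norm_num : (0:Int) < 5)]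
  · by_cases h2 : (l.length : Int) % 20 % 10 > 0 <;> simp only [h2, if_true, if_false] <;> omega
  · omega

-- the commercial ladder (5,3,1, base 100) telescopes to exactly n
theorem bonus_commercial (l : List (List (String × String))) :
    calculate_bonus l 5 3 1 100 = (l.length : Int) := by
  simp only [calculate_bonus,
    PySem.Int.floordiv_eq_ediv_of_pos (a := (l.length : Int)) (by norm_num : (0:Int) < 5),
    PySem.Int.mod_eq_emod_of_pos (a := (l.length : Int)) (by norm_num : (0:Int) < 5)]
  by_cases h1 : (l.length : Int) % 5 > 0 <;>
    simp only [h1, if_true, if_false,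
      PySem.Int.floordiv_eq_ediv_of_pos (by norm_num : (0:Int) < 3),
      PySem.Int.mod_eq_emod_of_pos (by norm_num : (0:Int) < 3),
      PySem.Int.floordiv_eq_ediv_of_pos (by norm_num : (0:Int) < 1),
      PySem.Int.mod_eq_emod_of_pos (by norm_num : (0:Int) < 1)]
  · by_cases h2 : (l.length : Int) % 5 % 3 > 0 <;> simp only [h2, if_true, if_false] <;> omega
  · omega

-- the counting fold computes the two filter counts
theorem fold_counts (bookings : List (List (String × String))) (acc : Int × Int) :
    bookings.foldl
      (fun (acc : Int × Int) b =>
        match b.lookup "type" with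
        | some t => if t == "residence" then (acc.1 + 1, acc.2)
                    else if t == "commercial" then (acc.1, acc.2 + 1) else acc
        | none => acc)
      acc
    = (acc.1 + (bookings.countP (fun b => b.lookup "type" == some "residence") : Int),
       acc.2 + (bookings.countP (fun b => b.lookup "type" == some "commercial") : Int)) := by
  induction bookings generalizing acc with
  | nil => simp
  | cons b rest ih =>
    simp only [List.foldl_cons, List.countP_cons, ih]
    rcases hlk : b.lookup "type" with _ | t
    · simp
    · by_cases hr : t = "residence"
      · subst hr; simp; omega
      · by_cases hc : t = "commercial"
        · subst hc; simp; omega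
        · simp [hr, hc]

-- ===== VERDICT (by name: the statement is the Claim_ definition above) =====
theorem calculate_salary_spec : Claim_equal_calculate_salary := by
  intro bookings shifts _ _
  unfold Spec_calculate_salary calculate_salary calculate_salary_alt
  simp only [bonus_residence, bonus_commercial, fold_counts, List.countP_eq_length_filter,
    zero_add]
  ring
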